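-- pv_equiv track=rewrite | github.com/mxer/kaldi-recipes | cgn/local/cgn_prep_lex.py | map_transcript
-- ===== SOURCE A (Python) =====
-- def map_transcript(s):
--     modifiers = {"+", "~", ":"}
--     ignore = {"-", "'"}
--
--     while len(s) > 0:
--         if s[0] in ignore:
--             pass
--         elif len(s) > 1 and s[1] in modifiers:
--             yield s[:2]
--             s = s[1:]
--         else:
--             yield s[0]
--
--         s = s[1:]
-- ===== SOURCE B (Python) =====
-- def map_transcript(s):
--     out = []
--     prev = None  # last non-ignore char, waiting to see if a modifier follows
--     for c in s:
--         if prev is not None: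
--             if c in "+~:":
--                 out.append(prev + c)
--                 prev = None
--                 continue
--             out.append(prev)
--             prev = None
--         if c in "-'":
--             continue
--         prev = c
--     if prev is not None:
--         out.append(prev)
--     return out
-- ===== Notes on version B (the rewrite author's own statement) =====
-- stated objective: faster
-- what changed: Replaced the while-loop that repeatedly reslices the string and peeks at s[1] with a single for-loop state machine carrying one pending character, emitting tokens one step delayed.
import Mathlib
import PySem

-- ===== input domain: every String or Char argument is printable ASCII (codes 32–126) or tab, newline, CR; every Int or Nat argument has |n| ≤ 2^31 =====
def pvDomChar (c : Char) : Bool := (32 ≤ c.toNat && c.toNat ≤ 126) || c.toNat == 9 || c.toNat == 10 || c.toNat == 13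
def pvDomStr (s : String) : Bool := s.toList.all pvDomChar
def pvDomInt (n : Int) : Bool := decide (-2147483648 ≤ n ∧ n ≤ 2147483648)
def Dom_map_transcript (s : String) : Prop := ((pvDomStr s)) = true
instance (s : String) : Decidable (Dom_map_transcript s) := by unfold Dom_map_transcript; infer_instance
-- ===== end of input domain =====

-- B replaces A's O(n^2) reslicing/lookahead while-loop by a one-pass state machine with a pending character.

-- ===== PORT A =====
-- A's while-loop over the ever-shrinking string, transliterated as recursion on the char list:
-- s[0] = head, s[1] = second element, s[:2] = first two chars, s = s[1:] = tail (taken once or twice).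
def mapTranscriptGoA : List Char → List String
  | [] => []
  | [c] =>
    if c == '-' || c == '\'' then []
    else [String.ofList [c]]
  | c :: m :: rest2 =>
    if c == '-' || c == '\'' then mapTranscriptGoA (m :: rest2)
    else if m == '+' || m == '~' || m == ':' then
      String.ofList [c, m] :: mapTranscriptGoA rest2
    else String.ofList [c] :: mapTranscriptGoA (m :: rest2)

def map_transcript (s : String) : List String := mapTranscriptGoA s.toList

-- ===== PORT B =====
-- B's loop body: state = (out, prev); exactly Source B's branches.
def mapTranscriptStepB (st : List String × Option Char) (c : Char) : List String × Option Char :=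
  match st with
  | (out, some p) =>
    if c == '+' || c == '~' || c == ':' then (out ++ [String.ofList [p, c]], none)
    else if c == '-' || c == '\'' then (out ++ [String.ofList [p]], none)
    else (out ++ [String.ofList [p]], some c)
  | (out, none) =>
    if c == '-' || c == '\'' then (out, none)
    else (out, some c)

def mapTranscriptFinishB : List String × Option Char → List String
  | (out, some p) => out ++ [String.ofList [p]]
  | (out, none) => out

def map_transcript_alt (s : String) : List String :=
  mapTranscriptFinishB (s.toList.foldl mapTranscriptStepB ([], none))

-- ===== PRECONDITION & SPEC =====
def Spec_map_transcript (s : String) (out : List String) : Prop := out = map_transcript_alt s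
instance (s : String) (out : List String) : Decidable (Spec_map_transcript s out) := by unfold Spec_map_transcript; infer_instance

-- ===== CLAIM (what is proved, stated in full; the proofs are below) =====
def Claim_equal_map_transcript : Prop := ∀ (s : String), Dom_map_transcript s → Spec_map_transcript s (map_transcript s)

-- ===== LEMMAS AND PROOFS =====

-- Skipping an ignore character does not change A's result.
theorem mapTranscriptGoA_ignore (c : Char) (rest : List Char)
    (h : (c == '-' || c == '\'') = true) :
    mapTranscriptGoA (c :: rest) = mapTranscriptGoA rest := by
  cases rest with
  | nil => simp [mapTranscriptGoA, h]
  | cons m r => simp [mapTranscriptGoA, h]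

-- Invariant: running B's fold from (acc, none) appends A's tokens of l; from (acc, some p)
-- with p not an ignore char, it appends A's tokens of p :: l.
theorem mapTranscript_inv (l : List Char) :
    (∀ acc, mapTranscriptFinishB (l.foldl mapTranscriptStepB (acc, none)) = acc ++ mapTranscriptGoA l) ∧
    (∀ acc p, (p == '-' || p == '\'') = false →
      mapTranscriptFinishB (l.foldl mapTranscriptStepB (acc, some p)) = acc ++ mapTranscriptGoA (p :: l)) := by
  induction l with
  | nil =>
    refine ⟨fun acc => by simp [mapTranscriptFinishB, mapTranscriptGoA], fun acc p hp => ?_⟩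
    simp [mapTranscriptFinishB, mapTranscriptGoA, hp]
  | cons c rest ih =>
    obtain ⟨ih1, ih2⟩ := ih
    constructor
    · intro acc
      by_cases hig : (c == '-' || c == '\'') = true
      · rw [mapTranscriptGoA_ignore c rest hig]
        simp only [List.foldl, mapTranscriptStepB, hig, if_true]
        exact ih1 acc
      · simp only [Bool.not_eq_true] at hig
        simp only [List.foldl, mapTranscriptStepB, hig, Bool.false_eq_true, if_false]
        exact ih2 acc c hig
    · intro acc p hp
      by_cases hmod : (c == '+' || c == '~' || c == ':') = true
      · simp only [List.foldl, mapTranscriptStepB, hmod, if_true]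
        rw [ih1, mapTranscriptGoA]
        simp [hp, hmod]
      · simp only [Bool.not_eq_true] at hmod
        by_cases hig : (c == '-' || c == '\'') = true
        · simp only [List.foldl, mapTranscriptStepB, hmod, hig, Bool.false_eq_true, if_false, if_true]
          rw [ih1, mapTranscriptGoA, mapTranscriptGoA_ignore c rest hig]
          simp [hp, hmod]
        · simp only [Bool.not_eq_true] at hig
          simp only [List.foldl, mapTranscriptStepB, hmod, hig, Bool.false_eq_true, if_false]
          rw [ih2 _ c hig, mapTranscriptGoA]
          simp [hp, hmod]

-- ===== VERDICT (by name: the statement is the Claim_ definition above) =====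
theorem map_transcript_spec : Claim_equal_map_transcript := by
  intro s _
  unfold Spec_map_transcript map_transcript map_transcript_alt
  rw [(mapTranscript_inv s.toList).1 []]
  simp
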